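-- pv_equiv track=rewrite | github.com/pectom/dss_alpha_algo | main.py | calculate_short_loops
-- ===== SOURCE A (Python) =====
-- def calculate_short_loops(log):
--     events_in_short_loops = {}
--     log_without_loops = []
--     for trace in log:
--         trace_without_loops = [trace[0]]
--         idx = 0
--         while idx < len(trace) - 1:
--             if trace[idx] == trace[idx + 1]:
--                 previous = trace[idx - 1]
--                 i = idx
--                 while trace[i] == trace[idx]:
--                     i += 1
--                 next = trace[i]
--                 if trace[idx] not in events_in_short_loops.keys():
--                     events_in_short_loops[trace[idx]] = set()
--                 events_in_short_loops[trace[idx]].add((previous, next))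
--                 idx = i
--             else:
--                 idx += 1
--             trace_without_loops.append(trace[idx])
--         log_without_loops.append(trace_without_loops)
--     return events_in_short_loops, log_without_loops
-- ===== SOURCE B (Python) =====
-- def calculate_short_loops(log):
--     # Two-phase per trace: first build explicit maximal runs (value, start, end),
--     # then derive the collapsed trace and the loop-context events from the runs.
--     events_in_short_loops = {}
--     log_without_loops = []
--     for trace in log:
--         runs = []
--         start = 0
--         while start < len(trace):
--             end = start + 1
--             while end < len(trace) and trace[end] == trace[start]:
--                 end += 1
--             runs.append((trace[start], start, end))
--             start = end
--         log_without_loops.append([v for v, s, e in runs])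
--         for v, s, e in runs:
--             if e - s >= 2:
--                 events_in_short_loops.setdefault(v, set()).add((trace[s - 1], trace[e]))
--     return events_in_short_loops, log_without_loops
-- ===== Notes on version B (the rewrite author's own statement) =====
-- stated objective: alternative
-- what changed: B replaces A's single interleaved index-walk (adjacent-pair detection with an inner skip loop that records events and appends while walking) by a two-phase decomposition: first build the explicit list of maximal runs (value, start, end) per trace, then derive the collapsed trace as a map over the runs and the loop-context events by one pass over the runs of length >= 2.
import Mathlib
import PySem

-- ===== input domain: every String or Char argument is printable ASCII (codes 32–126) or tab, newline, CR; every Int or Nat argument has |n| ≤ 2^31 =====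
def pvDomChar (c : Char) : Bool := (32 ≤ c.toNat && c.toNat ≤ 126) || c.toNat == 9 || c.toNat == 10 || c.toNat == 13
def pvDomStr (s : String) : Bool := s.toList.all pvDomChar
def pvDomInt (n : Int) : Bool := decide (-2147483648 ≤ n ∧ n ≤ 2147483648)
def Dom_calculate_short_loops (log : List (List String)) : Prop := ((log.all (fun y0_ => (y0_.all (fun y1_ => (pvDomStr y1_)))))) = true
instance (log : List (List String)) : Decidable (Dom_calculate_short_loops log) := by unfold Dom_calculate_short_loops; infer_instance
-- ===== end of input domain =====

-- B replaces A's interleaved index-walk by a two-phase runs decomposition (alternative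
-- decomposition, same cost); equivalence is proved on Pre_ (A raises outside it).

-- total form of Python indexing t[j] (negative j wraps, as in Python); on inputs
-- admitted by Pre_ the default "" is never the result of a read Python performs
def pyAt (t : List String) (j : Int) : String := PySem.List.pyGetD t j ""

-- ===== PORT A =====
-- inner 'while trace[i] == trace[idx]: i += 1'; Python raises IndexError when i runs
-- past the end (the none branch; such inputs are excluded by Pre_); fuel only makes
-- the recursion structural and is never exhausted at the call site's value
def aNext (t : List String) (fuel : Nat) (v : String) (i : Nat) : Nat :=
  match fuel with
  | 0 => i
  | fuel + 1 =>
    match PySem.List.pyGet? t (i : Int) with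
    | some x => if x == v then aNext t fuel v (i + 1) else i
    | none => i

-- the 'while idx < len(trace) - 1' loop; fuel ≥ number of iterations (idx grows)
def aLoop (t : List String) (fuel idx : Nat)
    (ev : PySem.Dict String (PySem.Set (String × String))) (acc : List String) :
    PySem.Dict String (PySem.Set (String × String)) × List String :=
  match fuel with
  | 0 => (ev, acc)
  | fuel + 1 =>
    if idx + 1 < t.length then
      if pyAt t idx == pyAt t (idx + 1) then
        let v := pyAt t idx
        let previous := pyAt t ((idx : Int) - 1)
        let i := aNext t (t.length + 1) v idx
        let next := pyAt t (i : Int)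
        let ev1 := if ev.contains v then ev else ev.insert v PySem.Set.empty
        let ev2 := ev1.insert v (PySem.Set.add (ev1.getD v PySem.Set.empty) (previous, next))
        aLoop t fuel i ev2 (acc ++ [next])
      else
        aLoop t fuel (idx + 1) ev (acc ++ [pyAt t ((idx : Int) + 1)])
    else (ev, acc)

-- body of A's 'for trace in log' loop
def aStep (st : PySem.Dict String (PySem.Set (String × String)) × List (List String))
    (t : List String) :
    PySem.Dict String (PySem.Set (String × String)) × List (List String) :=
  let (ev, lw) := st
  let r := aLoop t t.length 0 ev [pyAt t 0]
  (r.1, lw ++ [r.2])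

def calculate_short_loops (log : List (List String)) :
    (List (String × List (String × String))) × List (List String) :=
  let r := log.foldl aStep (PySem.Dict.empty, [])
  (r.1.items, r.2)

-- ===== PORT B =====
-- 'while end < len(trace) and trace[end] == trace[start]: end += 1'; fuel only makes
-- the recursion structural and is never exhausted at the call site's value
def bEnd (t : List String) (fuel : Nat) (v : String) (e : Nat) : Nat :=
  match fuel with
  | 0 => e
  | fuel + 1 =>
    if e < t.length then
      if pyAt t e == v then bEnd t fuel v (e + 1) else e
    else e

-- the 'while start < len(trace)' run builder, accumulating runs (value, start, end)
def bRunsAux (t : List String) (fuel : Nat) (runs : List (String × Nat × Nat))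
    (start : Nat) : List (String × Nat × Nat) :=
  match fuel with
  | 0 => runs
  | fuel + 1 =>
    if start < t.length then
      let e := bEnd t (t.length + 1) (pyAt t start) (start + 1)
      bRunsAux t fuel (runs ++ [(pyAt t start, start, e)]) e
    else runs

-- events.setdefault(v, set()).add((trace[s-1], trace[e])) — exactly Dict.modify:
-- present key: the stored set gains the pair in place; absent key: (v, {pair}) appends
def bEvStep (t : List String)
    (ev : PySem.Dict String (PySem.Set (String × String))) (r : String × Nat × Nat) :
    PySem.Dict String (PySem.Set (String × String)) :=
  if 2 ≤ r.2.2 - r.2.1 then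
    ev.modify r.1 PySem.Set.empty
      (fun s => PySem.Set.add s (pyAt t ((r.2.1 : Int) - 1), pyAt t (r.2.2 : Int)))
  else ev

-- body of B's 'for trace in log' loop
def bStep (st : PySem.Dict String (PySem.Set (String × String)) × List (List String))
    (t : List String) :
    PySem.Dict String (PySem.Set (String × String)) × List (List String) :=
  let (ev, lw) := st
  let runs := bRunsAux t (t.length + 1) [] 0
  (runs.foldl (bEvStep t) ev, lw ++ [runs.map (fun r => r.1)])

def calculate_short_loops_alt (log : List (List String)) :
    (List (String × List (String × String))) × List (List String) :=
  let r := log.foldl bStep (PySem.Dict.empty, [])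
  (r.1.items, r.2)

-- ===== PRECONDITION & SPEC =====
-- Pre_ is exactly where Python A returns: every trace nonempty (else trace[0] raises
-- IndexError) and no trace ends with a repeated event (else the inner while runs past
-- the end and trace[i] raises IndexError)
def Pre_calculate_short_loops (log : List (List String)) : Prop :=
  ∀ tr ∈ log, tr ≠ [] ∧ (tr.length < 2 ∨ tr[tr.length - 2]? ≠ tr[tr.length - 1]?)
instance (log : List (List String)) : Decidable (Pre_calculate_short_loops log) := by
  unfold Pre_calculate_short_loops; infer_instance

def pvWitness_calculate_short_loops : List (List String) :=
  [["a", "a", "b"], ["x", "y", "y", "x"], ["z"]]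

def Spec_calculate_short_loops (log : List (List String))
    (out : (List (String × List (String × String))) × List (List String)) : Prop :=
  out = calculate_short_loops_alt log
instance (log : List (List String))
    (out : (List (String × List (String × String))) × List (List String)) :
    Decidable (Spec_calculate_short_loops log out) := by
  unfold Spec_calculate_short_loops; infer_instance

-- ===== CLAIM (what is proved, stated in full; the proofs are below) =====
def Claim_equal_calculate_short_loops : Prop :=
  ∀ (log : List (List String)), Dom_calculate_short_loops log →
    Pre_calculate_short_loops log →
    Spec_calculate_short_loops log (calculate_short_loops log)

-- ===== LEMMAS AND PROOFS =====

theorem bEnd_ge (t : List String) (fuel : Nat) (v : String) :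
    ∀ e, e ≤ bEnd t fuel v e := by
  induction fuel with
  | zero => intro e; simp [bEnd]
  | succ fuel ih =>
    intro e
    simp only [bEnd]
    split
    · split
      · exact le_trans (by omega) (ih (e + 1))
      · exact le_refl e
    · exact le_refl e

theorem bEnd_of_ge (t : List String) (fuel : Nat) (v : String) (e : Nat)
    (h : t.length ≤ e) : bEnd t fuel v e = e := by
  cases fuel with
  | zero => rfl
  | succ fuel => simp [bEnd]; omega

theorem bEnd_congr (t : List String) (v : String) :
    ∀ (fuel fuel' e : Nat), t.length ≤ e + fuel → t.length ≤ e + fuel' →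
      bEnd t fuel v e = bEnd t fuel' v e := by
  intro fuel
  induction fuel with
  | zero =>
    intro fuel' e h h'
    simp only [bEnd]
    exact (bEnd_of_ge t fuel' v e (by omega)).symm
  | succ fuel ih =>
    intro fuel' e h h'
    by_cases he : e < t.length
    · cases fuel' with
      | zero => omega
      | succ fuel' =>
        simp only [bEnd, if_pos he]
        split
        · exact ih fuel' (e + 1) (by omega) (by omega)
        · rfl
    · rw [bEnd_of_ge t _ v e (by omega), bEnd_of_ge t _ v e (by omega)]

theorem bEnd_le (t : List String) (v : String) :
    ∀ (fuel e : Nat), e ≤ t.length → bEnd t fuel v e ≤ t.length := by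
  intro fuel
  induction fuel with
  | zero => intro e h; simpa [bEnd] using h
  | succ fuel ih =>
    intro e h
    simp only [bEnd]
    split
    · split
      · exact ih (e + 1) (by omega)
      · exact h
    · exact h

theorem bEnd_mid (t : List String) (v : String) :
    ∀ (fuel e j : Nat), e ≤ j → j < bEnd t fuel v e → pyAt t j = v := by
  intro fuel
  induction fuel with
  | zero => intro e j h1 h2; simp [bEnd] at h2; omega
  | succ fuel ih =>
    intro e j h1 h2
    simp only [bEnd] at h2
    by_cases he : e < t.length
    · rw [if_pos he] at h2
      by_cases hv : pyAt t e == v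
      · rw [if_pos hv] at h2
        rcases Nat.eq_or_lt_of_le h1 with rfl | hlt
        · exact eq_of_beq hv
        · exact ih (e + 1) j hlt h2
      · rw [if_neg hv] at h2; omega
    · rw [if_neg he] at h2; omega

theorem aNext_eq_bEnd (t : List String) (v : String) :
    ∀ (fuel e : Nat), aNext t fuel v e = bEnd t fuel v e := by
  intro fuel
  induction fuel with
  | zero => intro e; rfl
  | succ fuel ih =>
    intro e
    simp only [aNext, bEnd, PySem.List.pyGet?_natCast]
    by_cases he : e < t.length
    · rw [List.getElem?_eq_getElem he, if_pos he]
      have hat : pyAt t (e : Int) = t[e] := by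
        simp [pyAt, PySem.List.pyGetD_natCast, List.getD_eq_getElem?_getD,
          List.getElem?_eq_getElem he]
      rw [hat]
      split <;> simp_all
    · rw [List.getElem?_eq_none (by omega), if_neg he]

theorem bRunsAux_append (t : List String) :
    ∀ (fuel : Nat) (runs : List (String × Nat × Nat)) (s : Nat),
      bRunsAux t fuel runs s = runs ++ bRunsAux t fuel [] s := by
  intro fuel
  induction fuel with
  | zero => intro runs s; simp [bRunsAux]
  | succ fuel ih =>
    intro runs s
    simp only [bRunsAux]
    split
    · rw [ih (runs ++ _), ih ([] ++ _)]
      simp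
    · simp

theorem bRunsAux_congr (t : List String) :
    ∀ (fuel fuel' s : Nat), t.length ≤ s + fuel → t.length ≤ s + fuel' →
      bRunsAux t fuel [] s = bRunsAux t fuel' [] s := by
  intro fuel
  induction fuel with
  | zero =>
    intro fuel' s h h'
    cases fuel' with
    | zero => rfl
    | succ fuel' => simp only [bRunsAux]; rw [if_neg (by omega)]
  | succ fuel ih =>
    intro fuel' s h h'
    by_cases hs : s < t.length
    · cases fuel' with
      | zero => omega
      | succ fuel' =>
        simp only [bRunsAux, if_pos hs]
        rw [bRunsAux_append t fuel, bRunsAux_append t fuel']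
        have hge := bEnd_ge t (t.length + 1) (pyAt t (s : Int)) (s + 1)
        rw [ih fuel' _ (by omega) (by omega)]
    · cases fuel' with
      | zero => simp only [bRunsAux]; rw [if_neg hs]
      | succ fuel' => simp only [bRunsAux]; rw [if_neg hs, if_neg hs]

theorem dict_update_eq (ev : PySem.Dict String (PySem.Set (String × String)))
    (v : String) (p : String × String) :
    ((if ev.contains v then ev else ev.insert v PySem.Set.empty).insert v
      (PySem.Set.add
        ((if ev.contains v then ev else ev.insert v PySem.Set.empty).getD v
          PySem.Set.empty) p)) =
    ev.modify v PySem.Set.empty (fun s => PySem.Set.add s p) := by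
  by_cases h : ev.contains v
  · rw [if_pos h]; rfl
  · rw [if_neg h]
    show (ev.insert v PySem.Set.empty).insert v _ = _
    rw [PySem.Dict.insert_insert_self, PySem.Dict.getD_insert_self]
    have : ev.getD v PySem.Set.empty = PySem.Set.empty := by
      apply PySem.Dict.getD_of_not_contains
      simpa using h
    show _ = ev.insert v (PySem.Set.add (ev.getD v PySem.Set.empty) p)
    rw [this]


theorem bRunsAux_of_ge (t : List String) (fuel : Nat) (runs : List (String × Nat × Nat))
    (s : Nat) (h : t.length ≤ s) : bRunsAux t fuel runs s = runs := by
  cases fuel with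
  | zero => rfl
  | succ fuel => simp only [bRunsAux]; rw [if_neg (by omega)]

theorem pyAt_nat (t : List String) (n : Nat) (h : n < t.length) :
    pyAt t (n : Int) = t[n] := by
  simp [pyAt, PySem.List.pyGetD_natCast, List.getD_eq_getElem?_getD,
    List.getElem?_eq_getElem h]

theorem bRuns_last (t : List String) (idx : Nat) (h1 : idx < t.length)
    (h2 : t.length ≤ idx + 1) :
    bRunsAux t (t.length + 1) [] idx = [(pyAt t (idx : Int), idx, idx + 1)] := by
  conv_lhs => simp only [bRunsAux]
  rw [if_pos h1, bEnd_of_ge t _ _ (idx + 1) h2, bRunsAux_of_ge t _ _ (idx + 1) h2]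
  simp

theorem bRuns_cons (t : List String) (idx : Nat) (h1 : idx < t.length) :
    bRunsAux t (t.length + 1) [] idx =
      (pyAt t (idx : Int), idx, bEnd t (t.length + 1) (pyAt t (idx : Int)) (idx + 1)) ::
        bRunsAux t (t.length + 1) []
          (bEnd t (t.length + 1) (pyAt t (idx : Int)) (idx + 1)) := by
  conv_lhs => simp only [bRunsAux]
  rw [if_pos h1, bRunsAux_append]
  have hge := bEnd_ge t (t.length + 1) (pyAt t (idx : Int)) (idx + 1)
  rw [bRunsAux_congr t t.length (t.length + 1) _ (by omega) (by omega)]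
  simp

theorem bEvStep_short (t : List String) (ev : PySem.Dict String (PySem.Set (String × String)))
    (v : String) (idx : Nat) : bEvStep t ev (v, idx, idx + 1) = ev := by
  simp [bEvStep]

theorem aLoop_term (t : List String) (idx : Nat)
    (ev : PySem.Dict String (PySem.Set (String × String))) (acc : List String)
    (h1 : idx < t.length) (h2 : t.length ≤ idx + 1) :
    ((bRunsAux t (t.length + 1) [] idx).foldl (bEvStep t) ev,
      acc ++ ((bRunsAux t (t.length + 1) [] idx).tail.map (fun r => r.1))) = (ev, acc) := by
  rw [bRuns_last t idx h1 h2, List.foldl_cons, List.foldl_nil, List.tail_cons,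
    bEvStep_short]
  simp

theorem aLoop_eq (t : List String) (fuel : Nat) :
    ∀ (idx : Nat) (ev : PySem.Dict String (PySem.Set (String × String)))
      (acc : List String),
      idx < t.length →
      t.length - 1 - idx ≤ fuel →
      (2 ≤ t.length → pyAt t ((t.length : Int) - 2) ≠ pyAt t ((t.length : Int) - 1)) →
      aLoop t fuel idx ev acc =
        ((bRunsAux t (t.length + 1) [] idx).foldl (bEvStep t) ev,
          acc ++ ((bRunsAux t (t.length + 1) [] idx).tail.map (fun r => r.1))) := by
  induction fuel with
  | zero =>
    intro idx ev acc hidx hfuel hlast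
    exact (aLoop_term t idx ev acc hidx (by omega)).symm
  | succ fuel ih =>
    intro idx ev acc hidx hfuel hlast
    by_cases hg : idx + 1 < t.length
    · simp only [aLoop]
      rw [if_pos hg]
      have hcast : ((idx + 1 : Nat) : Int) = (idx : Int) + 1 := by omega
      by_cases heq : pyAt t (idx : Int) == pyAt t ((idx : Int) + 1)
      · rw [if_pos heq]
        have hvnext : pyAt t ((idx + 1 : Nat) : Int) = pyAt t (idx : Int) := by
          rw [hcast]; exact (eq_of_beq heq).symm
        have hstep : aNext t (t.length + 1) (pyAt t (idx : Int)) idx =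
            bEnd t (t.length + 1) (pyAt t (idx : Int)) (idx + 1) := by
          rw [aNext_eq_bEnd]
          conv_lhs => simp only [bEnd]
          rw [if_pos (by omega : idx < t.length), if_pos (beq_self_eq_true _)]
          exact bEnd_congr t _ t.length (t.length + 1) (idx + 1) (by omega) (by omega)
        rw [hstep]
        set e := bEnd t (t.length + 1) (pyAt t (idx : Int)) (idx + 1) with hedef
        have he2 : idx + 2 ≤ e := by
          have hu : e = bEnd t t.length (pyAt t (idx : Int)) (idx + 2) := by
            rw [hedef]
            conv_lhs => simp only [bEnd]
            rw [if_pos hg, if_pos (by rw [hvnext]; exact beq_self_eq_true _)]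
          have := bEnd_ge t t.length (pyAt t (idx : Int)) (idx + 2)
          omega
        have heL : e ≤ t.length := by
          rw [hedef]; exact bEnd_le t _ (t.length + 1) (idx + 1) (by omega)
        have helt : e < t.length := by
          by_contra hnot
          have heqL : e = t.length := by omega
          have hL2 : 2 ≤ t.length := by omega
          have hm1 : pyAt t ((t.length - 1 : Nat) : Int) = pyAt t (idx : Int) :=
            bEnd_mid t (pyAt t (idx : Int)) (t.length + 1) (idx + 1) (t.length - 1)
              (by omega) (by rw [← hedef]; omega)
          have hm2 : pyAt t ((t.length - 2 : Nat) : Int) = pyAt t (idx : Int) := by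
            rcases Nat.lt_or_ge idx (t.length - 2) with hc | hc
            · exact bEnd_mid t (pyAt t (idx : Int)) (t.length + 1) (idx + 1)
                (t.length - 2) (by omega) (by rw [← hedef]; omega)
            · have hx : idx = t.length - 2 := by omega
              rw [← hx]
          apply hlast hL2
          have c2 : ((t.length : Int) - 2) = ((t.length - 2 : Nat) : Int) := by omega
          have c1 : ((t.length : Int) - 1) = ((t.length - 1 : Nat) : Int) := by omega
          rw [c2, c1, hm2, hm1]
        rw [bRuns_cons t idx hidx, ← hedef, List.foldl_cons, List.tail_cons]
        have hstep2 : bEvStep t ev (pyAt t (idx : Int), idx, e) =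
            ev.modify (pyAt t (idx : Int)) PySem.Set.empty
              (fun s => PySem.Set.add s (pyAt t ((idx : Int) - 1), pyAt t (e : Int))) := by
          simp only [bEvStep]
          rw [if_pos (by omega : 2 ≤ e - idx)]
        rw [hstep2, dict_update_eq ev (pyAt t (idx : Int))]
        rw [ih e _ _ helt (by omega) hlast]
        rw [bRuns_cons t e helt]
        simp
      · rw [if_neg heq]
        have hb : bEnd t (t.length + 1) (pyAt t (idx : Int)) (idx + 1) = idx + 1 := by
          conv_lhs => simp only [bEnd]
          rw [if_pos hg, if_neg (by
            rw [hcast]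
            intro hc
            exact heq (beq_iff_eq.mpr (eq_of_beq hc).symm))]
        rw [bRuns_cons t idx hidx, hb, List.foldl_cons, List.tail_cons, bEvStep_short]
        rw [ih (idx + 1) ev _ hg (by omega) hlast]
        rw [bRuns_cons t (idx + 1) hg]
        simp [hcast]
    · simp only [aLoop]
      rw [if_neg hg]
      exact (aLoop_term t idx ev acc hidx (by omega)).symm

-- ===== VERDICT (by name: the statement is the Claim_ definition above) =====
theorem step_eq (st : PySem.Dict String (PySem.Set (String × String)) × List (List String))
    (tr : List String) (hne : tr ≠ [])
    (hl : tr.length < 2 ∨ tr[tr.length - 2]? ≠ tr[tr.length - 1]?) :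
    aStep st tr = bStep st tr := by
  obtain ⟨ev, lw⟩ := st
  have hL : 0 < tr.length := by
    cases tr with
    | nil => exact absurd rfl hne
    | cons a l => simp
  have hlast : 2 ≤ tr.length →
      pyAt tr ((tr.length : Int) - 2) ≠ pyAt tr ((tr.length : Int) - 1) := by
    intro h2
    rcases hl with h | h
    · omega
    · have c2 : ((tr.length : Int) - 2) = ((tr.length - 2 : Nat) : Int) := by omega
      have c1 : ((tr.length : Int) - 1) = ((tr.length - 1 : Nat) : Int) := by omega
      rw [c2, c1, pyAt_nat tr _ (by omega), pyAt_nat tr _ (by omega)]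
      intro hEq
      apply h
      rw [List.getElem?_eq_getElem (by omega), List.getElem?_eq_getElem (by omega), hEq]
  simp only [aStep, bStep]
  rw [aLoop_eq tr tr.length 0 ev [pyAt tr 0] hL (by omega) hlast]
  rw [bRuns_cons tr 0 hL]
  simp

theorem foldl_eq :
    ∀ (log : List (List String))
      (st : PySem.Dict String (PySem.Set (String × String)) × List (List String)),
      (∀ tr ∈ log, tr ≠ [] ∧ (tr.length < 2 ∨ tr[tr.length - 2]? ≠ tr[tr.length - 1]?)) →
      log.foldl aStep st = log.foldl bStep st := by
  intro log
  induction log with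
  | nil => intro st h; rfl
  | cons tr log ih =>
    intro st h
    simp only [List.foldl_cons]
    rw [step_eq st tr (h tr (by simp)).1 (h tr (by simp)).2]
    exact ih _ (fun x hx => h x (by simp [hx]))

theorem calculate_short_loops_spec : Claim_equal_calculate_short_loops := by
  intro log _ hpre
  unfold Pre_calculate_short_loops at hpre
  unfold Spec_calculate_short_loops calculate_short_loops calculate_short_loops_alt
  rw [foldl_eq log _ hpre]
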